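-- pv_equiv track=rewrite | github.com/suresh-vuppala/interview-ignite-lab | src/data/courses/dsa/prefix-sum/prefix-sum-fundamentals/count-odd-even-subarrays/code/python/count_odd_even_subarrays.py | count_odd_even_optimized
-- ===== SOURCE A (Python) =====
-- def count_odd_even_optimized(nums):
--     n = len(nums)
--     count = 0
--
--     for i in range(n):
--         odd_count = 0
--         even_count = 0
--
--         for j in range(i, n):
--             if nums[j] % 2 == 1:
--                 odd_count += 1
--             else:
--                 even_count += 1
--
--             if odd_count == even_count:
--                 count += 1
--
--     return count
-- ===== SOURCE B (Python) =====
-- def count_odd_even_optimized(nums):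
--     # O(n): prefix balance (+1 odd / -1 even); a subarray is balanced iff two
--     # prefix balances are equal, so count equal-balance prefix pairs with a dict.
--     freq = {0: 1}
--     s = 0
--     count = 0
--     for x in nums:
--         s += 1 if x % 2 == 1 else -1
--         count += freq.get(s, 0)
--         freq[s] = freq.get(s, 0) + 1
--     return count
-- ===== Notes on version B (the rewrite author's own statement) =====
-- stated objective: faster
-- what changed: Replaced the quadratic all-subarrays double loop by a single pass over prefix balances (+1 for odd, -1 for even) counting equal-balance prefix pairs with a hash map.
import Mathlib
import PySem

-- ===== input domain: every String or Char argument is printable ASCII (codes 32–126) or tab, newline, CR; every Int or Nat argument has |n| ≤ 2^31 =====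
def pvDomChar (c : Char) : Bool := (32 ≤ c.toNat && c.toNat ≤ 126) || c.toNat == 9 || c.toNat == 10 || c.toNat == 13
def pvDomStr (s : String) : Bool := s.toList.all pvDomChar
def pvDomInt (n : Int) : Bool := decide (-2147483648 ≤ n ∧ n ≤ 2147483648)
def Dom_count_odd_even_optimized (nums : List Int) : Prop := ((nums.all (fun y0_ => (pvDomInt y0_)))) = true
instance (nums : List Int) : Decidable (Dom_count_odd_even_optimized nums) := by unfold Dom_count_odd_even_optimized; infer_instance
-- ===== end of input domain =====

-- B replaces A's O(n^2) all-subarrays double loop by one O(n) pass over prefix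
-- balances (+1 odd / -1 even), counting equal-balance prefix pairs with a dict.


-- ===== PORT A =====
-- A's inner-loop body: update (odd_count, even_count, count) with element x
def pvStepA (st : Int × Int × Int) (x : Int) : Int × Int × Int :=
  let st1 := if PySem.Int.mod x 2 == 1
             then (st.1 + 1, st.2.1, st.2.2)
             else (st.1, st.2.1 + 1, st.2.2)
  if st1.1 == st1.2.1 then (st1.1, st1.2.1, st1.2.2 + 1) else st1

-- literal port of A: outer loop over i in range(n), inner loop over j in range(i, n)
-- carrying (odd_count, even_count, count)
def count_odd_even_optimized (nums : List Int) : Int :=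
  let n : Int := PySem.List.len nums
  (PySem.List.pyRange 0 n 1).foldl (fun count i =>
    ((PySem.List.pyRange i n 1).foldl
      (fun st j => pvStepA st (PySem.List.pyGetD nums j 0))
      (0, 0, count)).2.2) 0

-- ===== PORT B =====
-- literal port of B: one pass; state (freq dict, running balance s, count)
def count_odd_even_optimized_alt (nums : List Int) : Int :=
  (nums.foldl (fun (st : PySem.Dict Int Int × Int × Int) x =>
    let s := st.2.1 + (if PySem.Int.mod x 2 == 1 then 1 else -1)
    let count := st.2.2 + st.1.getD s 0
    (st.1.insert s (st.1.getD s 0 + 1), s, count))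
    ((PySem.Dict.empty).insert 0 1, 0, 0)).2.2

-- ===== PRECONDITION & SPEC =====
def Spec_count_odd_even_optimized (nums : List Int) (out : Int) : Prop := out = count_odd_even_optimized_alt nums
instance (nums : List Int) (out : Int) : Decidable (Spec_count_odd_even_optimized nums out) := by unfold Spec_count_odd_even_optimized; infer_instance

-- ===== CLAIM (what is proved, stated in full; the proofs are below) =====
def Claim_equal_count_odd_even_optimized : Prop := ∀ (nums : List Int), Dom_count_odd_even_optimized nums → Spec_count_odd_even_optimized nums (count_odd_even_optimized nums)

-- ===== LEMMAS AND PROOFS =====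

-- parity weight of an element (+1 odd, -1 even), shared vocabulary of the proofs
def pvF (x : Int) : Int := if PySem.Int.mod x 2 == 1 then 1 else -1

-- the list of prefix balances generated while scanning l starting from balance s
def pvPref : List Int → Int → List Int
  | [], _ => []
  | x :: l, s => (s + pvF x) :: pvPref l (s + pvF x)

-- pair count "first vs later": number of pairs (a, b), a before b, equal values
def pvPcf : List Int → Int
  | [] => 0
  | x :: l => (l.count x : Int) + pvPcf l

-- B's incremental matching against a multiplicity function m
def pvMatches (m : Int → Int) : List Int → Int
  | [] => 0
  | v :: vs => m v + pvMatches (fun w => if w = v then m w + 1 else m w) vs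

theorem pvPref_shift (l : List Int) (s : Int) :
    pvPref l s = (pvPref l 0).map (fun v => s + v) := by
  induction l generalizing s with
  | nil => rfl
  | cons x l ih =>
    rw [pvPref, pvPref, ih (s + pvF x), ih (0 + pvF x), List.map_cons, List.map_map]
    congr 1
    · ring
    · exact List.map_congr_left (fun v _ => by simp only [Function.comp_apply]; ring)

-- one step of A's inner loop, evaluated on a concrete state
theorem pvStepA_eval (oc ec c x : Int) :
    pvStepA (oc, ec, c) x
      = (oc + (if PySem.Int.mod x 2 == 1 then 1 else 0),
         ec + (if PySem.Int.mod x 2 == 1 then 0 else 1),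
         c + (if oc - ec + pvF x = 0 then 1 else 0)) := by
  unfold pvStepA pvF
  by_cases hx : (PySem.Int.mod x 2 == 1) = true
  · simp only [hx, if_true, beq_iff_eq]
    by_cases he : oc + 1 = ec
    · rw [if_pos he, if_pos (by omega)]
      simp
    · rw [if_neg he, if_neg (by omega)]
      simp
  · simp only [hx, if_false, Bool.false_eq_true, beq_iff_eq]
    by_cases he : oc = ec + 1
    · rw [if_pos he, if_pos (by omega)]
      simp
    · rw [if_neg he, if_neg (by omega)]
      simp

-- A's inner loop counts the zeros among the balances of pvPref
theorem pvInnerA (l : List Int) (oc ec c : Int) :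
    (l.foldl pvStepA (oc, ec, c)).2.2
    = c + ((pvPref l (oc - ec)).count 0 : Int) := by
  induction l generalizing oc ec c with
  | nil => simp [pvPref]
  | cons x l ih =>
    rw [List.foldl_cons, pvStepA_eval, ih, pvPref, List.count_cons]
    have harg : oc + (if PySem.Int.mod x 2 == 1 then 1 else 0)
        - (ec + (if PySem.Int.mod x 2 == 1 then 0 else 1))
        = oc - ec + pvF x := by
      unfold pvF; split_ifs <;> ring
    rw [harg]
    by_cases hz : oc - ec + pvF x = 0
    · rw [if_pos hz, if_pos (by simp [hz])]
      push_cast; ring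
    · rw [if_neg hz, if_neg (by simp [hz])]
      push_cast; ring

-- shifting the starting balance shifts every balance: zero-count relocates
theorem pvCount_shift (l : List Int) (s : Int) :
    (pvPref l s).count s = (pvPref l 0).count 0 := by
  rw [pvPref_shift]
  have hinj : Function.Injective (fun v : Int => s + v) := fun a b hab => by
    simpa using hab
  simpa using List.count_map_of_injective (pvPref l 0) (fun v : Int => s + v) hinj 0

-- sum of zero-counts over all suffixes = pair count of the prefix-balance list
theorem pvA2 (l : List Int) (s : Int) :
    pvPcf (s :: pvPref l s)
      = ((List.range l.length).map
          (fun k => ((pvPref (l.drop k) 0).count 0 : Int))).sum := by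
  induction l generalizing s with
  | nil => simp [pvPref, pvPcf]
  | cons x l ih =>
    have hL : pvPcf (s :: pvPref (x :: l) s)
        = ((pvPref (x :: l) s).count s : Int)
          + pvPcf ((s + pvF x) :: pvPref l (s + pvF x)) := by
      simp [pvPcf, pvPref]
    rw [hL, ih (s + pvF x), pvCount_shift, List.length_cons,
      List.range_succ_eq_map, List.map_cons, List.map_map, List.sum_cons]
    congr 1

theorem pvMatches_congr (vs : List Int) (m m' : Int → Int) (h : ∀ v, m v = m' v) :
    pvMatches m vs = pvMatches m' vs := by
  induction vs generalizing m m' with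
  | nil => rfl
  | cons v vs ih =>
    simp only [pvMatches, h v]
    exact congrArg _ (ih _ _ (fun w => by by_cases hw : w = v <;> simp [hw, h w, h v]))

theorem pvPcf_append_singleton (h : List Int) (v : Int) :
    pvPcf (h ++ [v]) = pvPcf h + (h.count v : Int) := by
  induction h with
  | nil => simp [pvPcf]
  | cons a h ih =>
    simp only [List.cons_append, pvPcf, ih, List.count_append, List.count_cons,
      List.count_nil, beq_iff_eq]
    by_cases hv : v = a
    · subst hv
      push_cast
      ring
    · rw [if_neg hv, if_neg (fun hh : a = v => hv hh.symm)]
      ring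

theorem pvMatches_count (vs h : List Int) :
    pvMatches (fun v => (h.count v : Int)) vs = pvPcf (h ++ vs) - pvPcf h := by
  induction vs generalizing h with
  | nil => simp [pvMatches]
  | cons v vs ih =>
    have hcongr : pvMatches (fun w => if w = v then (h.count w : Int) + 1 else (h.count w : Int)) vs
        = pvMatches (fun w => ((h ++ [v]).count w : Int)) vs := by
      apply pvMatches_congr
      intro w
      by_cases hw : w = v <;> simp [hw, List.count_append, List.count_singleton] <;> omega
    simp only [pvMatches, hcongr, ih (h ++ [v])]
    rw [pvPcf_append_singleton]
    have : h ++ [v] ++ vs = h ++ v :: vs := by simp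
    rw [this]
    ring

-- B's loop invariant
theorem pvBmain (l : List Int) (d : PySem.Dict Int Int) (s c : Int) :
    (l.foldl (fun (st : PySem.Dict Int Int × Int × Int) x =>
      let s := st.2.1 + (if PySem.Int.mod x 2 == 1 then 1 else -1)
      let count := st.2.2 + st.1.getD s 0
      (st.1.insert s (st.1.getD s 0 + 1), s, count)) (d, s, c)).2.2
    = c + pvMatches (fun v => d.getD v 0) (pvPref l s) := by
  induction l generalizing d s c with
  | nil => simp [pvPref, pvMatches]
  | cons x l ih =>
    rw [List.foldl_cons]
    show (l.foldl _ (d.insert (s + pvF x) (d.getD (s + pvF x) 0 + 1), s + pvF x,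
      c + d.getD (s + pvF x) 0)).2.2 = _
    rw [ih]
    simp only [pvPref, pvMatches]
    have hfun : ∀ v, (d.insert (s + pvF x) (d.getD (s + pvF x) 0 + 1)).getD v 0
        = (fun w => if w = s + pvF x then d.getD w 0 + 1 else d.getD w 0) v := fun v => by
      rw [PySem.Dict.getD_insert]
      by_cases hv : v = s + pvF x <;> simp [hv]
    rw [pvMatches_congr _ _ _ hfun]
    ring

-- ===== VERDICT (by name: the statement is the Claim_ definition above) =====
theorem count_odd_even_optimized_spec : Claim_equal_count_odd_even_optimized := by
  intro nums _
  unfold Spec_count_odd_even_optimized count_odd_even_optimized count_odd_even_optimized_alt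
  rw [pvBmain]
  show ((PySem.List.pyRange 0 (PySem.List.len nums) 1).foldl (fun count i =>
      ((PySem.List.pyRange i (PySem.List.len nums) 1).foldl
        (fun st j => pvStepA st (PySem.List.pyGetD nums j 0)) (0, 0, count)).2.2) 0)
    = 0 + pvMatches (fun v => ((PySem.Dict.empty : PySem.Dict Int Int).insert 0 1).getD v 0) (pvPref nums 0)
  have houter : ∀ (count i : Int), i ∈ PySem.List.pyRange 0 (PySem.List.len nums) 1 →
      ((PySem.List.pyRange i (PySem.List.len nums) 1).foldl
        (fun st j => pvStepA st (PySem.List.pyGetD nums j 0)) (0, 0, count)).2.2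
      = count + ((pvPref (nums.drop i.toNat) 0).count 0 : Int) := by
    intro count i hi
    have hi0 : 0 ≤ i := (PySem.List.mem_pyRange_one.1 hi).1
    rw [PySem.List.foldl_pyRange_pyGetD nums 0 pvStepA (0, 0, count) hi0, pvInnerA]
    norm_num
  have hcong := PySem.List.foldl_congr_mem (PySem.List.pyRange 0 (PySem.List.len nums) 1)
    (fun count i => ((PySem.List.pyRange i (PySem.List.len nums) 1).foldl
      (fun st j => pvStepA st (PySem.List.pyGetD nums j 0)) (0, 0, count)).2.2)
    (fun count i => count + ((pvPref (nums.drop i.toNat) 0).count 0 : Int)) 0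
    (fun acc x hx => houter acc x hx)
  rw [hcong]
  have hadd := PySem.List.foldl_add (PySem.List.pyRange 0 (PySem.List.len nums) 1)
    (fun i : Int => ((pvPref (nums.drop i.toNat) 0).count 0 : Int)) 0
  rw [hadd]
  have hrange : PySem.List.pyRange 0 (PySem.List.len nums) 1
      = (List.range nums.length).map (fun k : Nat => ((k : Int))) := by
    rw [PySem.List.pyRange_one]
    simp [PySem.List.len]
  rw [hrange, List.map_map]
  have hmap : ((List.range nums.length).map
      ((fun i : Int => ((pvPref (nums.drop i.toNat) 0).count 0 : Int)) ∘ (fun k : Nat => (k : Int))))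
      = (List.range nums.length).map (fun k => ((pvPref (nums.drop k) 0).count 0 : Int)) := by
    exact List.map_congr_left fun k _ => by simp
  rw [hmap, ← pvA2 nums 0]
  have hm : ∀ v : Int, ((PySem.Dict.empty : PySem.Dict Int Int).insert 0 1).getD v 0
      = (fun w => (([(0 : Int)].count w : Nat) : Int)) v := fun v => by
    rw [PySem.Dict.getD_insert]
    by_cases hv : v = 0
    · simp [hv]
    · simp [hv, PySem.Dict.getD_empty, List.count_singleton]
      omega
  rw [pvMatches_congr _ _ _ hm, pvMatches_count]
  have h0 : ([(0 : Int)] ++ pvPref nums 0) = 0 :: pvPref nums 0 := by simp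
  rw [h0]
  simp [pvPcf]
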